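-- pv_equiv track=rewrite | github.com/magliaral/ha-bacnet-hub | custom_components/bacnet_hub/client_runtime.py | _merge_non_none
-- ===== SOURCE A (Python) =====
-- from typing import Any
-- from typing import Any, Awaitable, Callable, Dict
--
-- def _merge_non_none(previous: dict[str, Any], current: dict[str, Any]) -> dict[str, Any]:
--     merged = dict(previous or {})
--     for key, value in dict(current or {}).items():
--         if value is not None:
--             merged[key] = value
--         elif key not in merged:
--             merged[key] = None
--     return merged
-- ===== SOURCE B (Python) =====
-- def _merge_non_none(previous, current):
--     prev = dict(previous or {})
--     cur = dict(current or {})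
--     keys = list(prev) + [k for k in cur if k not in prev]
--     return {k: cur[k] if cur.get(k) is not None else prev.get(k) for k in keys}
-- ===== Notes on version B (the rewrite author's own statement) =====
-- stated objective: simpler
-- what changed: B builds the ordered union of keys once (previous's keys, then current-only keys) and produces the result as a single per-key lookup comprehension, instead of copying previous and conditionally mutating it while iterating current.
import Mathlib
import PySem

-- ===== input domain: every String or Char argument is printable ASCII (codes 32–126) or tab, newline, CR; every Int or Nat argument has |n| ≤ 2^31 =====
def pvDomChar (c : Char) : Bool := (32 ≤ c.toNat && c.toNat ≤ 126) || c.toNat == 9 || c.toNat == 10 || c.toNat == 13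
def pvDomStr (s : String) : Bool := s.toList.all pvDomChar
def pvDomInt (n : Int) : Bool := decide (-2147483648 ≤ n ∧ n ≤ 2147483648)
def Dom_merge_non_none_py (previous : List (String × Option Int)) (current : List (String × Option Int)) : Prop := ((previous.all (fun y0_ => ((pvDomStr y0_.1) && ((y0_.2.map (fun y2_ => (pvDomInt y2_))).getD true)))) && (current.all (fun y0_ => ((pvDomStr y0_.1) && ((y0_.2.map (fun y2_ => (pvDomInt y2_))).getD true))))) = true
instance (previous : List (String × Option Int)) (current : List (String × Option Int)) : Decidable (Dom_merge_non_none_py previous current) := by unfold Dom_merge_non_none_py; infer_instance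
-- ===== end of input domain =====

-- B builds the ordered union of keys once and derives every value by lookup (simpler decomposition, same cost).


-- ===== PORT A =====
-- body of A's for-loop: 'if value is not None: merged[key] = value; elif key not in merged: merged[key] = None'
def mergeStepA (m : PySem.Dict String (Option Int)) (kv : String × Option Int) : PySem.Dict String (Option Int) :=
  match kv.2 with
  | some v => m.insert kv.1 (some v)
  | none => if m.contains kv.1 = false then m.insert kv.1 none else m

-- 'previous or {}' / 'current or {}' are behaviourally the identity on dicts, so they add no code here
def merge_non_none_py (previous : List (String × Option Int)) (current : List (String × Option Int)) : List (String × Option Int) :=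
  let merged : PySem.Dict String (Option Int) := PySem.Dict.ofList previous
  ((PySem.Dict.ofList current).items.foldl mergeStepA merged).items

-- ===== PORT B =====
def merge_non_none_py_alt (previous : List (String × Option Int)) (current : List (String × Option Int)) : List (String × Option Int) :=
  let p : PySem.Dict String (Option Int) := PySem.Dict.ofList previous
  let c : PySem.Dict String (Option Int) := PySem.Dict.ofList current
  let keys := p.keys ++ c.keys.filter (fun k => !(p.contains k))
  keys.map (fun k =>
    (k, match c.getD k none with
        | some v => some v
        | none => p.getD k none))

-- ===== PRECONDITION & SPEC =====
def Spec_merge_non_none_py (previous : List (String × Option Int)) (current : List (String × Option Int)) (out : List (String × Option Int)) : Prop := out = merge_non_none_py_alt previous current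
instance (previous : List (String × Option Int)) (current : List (String × Option Int)) (out : List (String × Option Int)) : Decidable (Spec_merge_non_none_py previous current out) := by unfold Spec_merge_non_none_py; infer_instance

-- ===== CLAIM (what is proved, stated in full; the proofs are below) =====
def Claim_equal_merge_non_none_py : Prop := ∀ (previous : List (String × Option Int)) (current : List (String × Option Int)), Dom_merge_non_none_py previous current → Spec_merge_non_none_py previous current (merge_non_none_py previous current)

-- ===== LEMMAS AND PROOFS =====

-- value A's loop leaves at a key that was already in `merged` before the loop,
-- given the (nodup-keyed) list `l` the loop runs over
def updv (l : List (String × Option Int)) (k : String) (v : Option Int) : Option Int :=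
  match l.find? (fun q => q.1 == k) with
  | some (_, some w) => some w
  | _ => v

theorem updv_nil (k : String) (v : Option Int) : updv [] k v = v := rfl

theorem updv_not_mem (l : List (String × Option Int)) (k : String) (v : Option Int)
    (h : k ∉ l.map Prod.fst) : updv l k v = v := by
  unfold updv
  have : l.find? (fun q => q.1 == k) = none := by
    rw [List.find?_eq_none]
    intro q hq hbeq
    exact h (List.mem_map.mpr ⟨q, hq, by simpa using hbeq⟩)
  rw [this]

theorem updv_cons_self_some' (p : String × Option Int) (l : List (String × Option Int))
    (k : String) (v : Option Int) (w : Int) (h : p.1 = k) (hw : p.2 = some w) :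
    updv (p :: l) k v = some w := by
  obtain ⟨k1, w1⟩ := p
  simp only at h hw
  subst h; subst hw
  unfold updv
  simp

theorem updv_cons_self_none (p : String × Option Int) (l : List (String × Option Int))
    (k : String) (v : Option Int) (h : p.1 = k) (hw : p.2 = none) :
    updv (p :: l) k v = v := by
  obtain ⟨k1, w1⟩ := p
  simp only at h hw
  subst h; subst hw
  unfold updv
  simp

theorem updv_cons_ne (p : String × Option Int) (l : List (String × Option Int))
    (k : String) (v : Option Int) (h : p.1 ≠ k) :
    updv (p :: l) k v = updv l k v := by
  unfold updv
  rw [List.find?_cons_of_neg]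
  simpa using h

-- characterisation of A's loop: each existing item gets its value updated by `updv`,
-- and the fresh pairs of `l` are appended verbatim
theorem foldl_mergeStepA_items (l : List (String × Option Int)) (m : PySem.Dict String (Option Int))
    (hm : m.keys.Nodup) (hl : (l.map Prod.fst).Nodup) :
    (l.foldl mergeStepA m).items
      = m.items.map (fun q => (q.1, updv l q.1 q.2))
        ++ l.filter (fun q => !(m.contains q.1)) := by
  induction l generalizing m with
  | nil => simp [updv_nil]
  | cons p t ih =>
    rw [List.map_cons] at hl
    have hpt : p.1 ∉ t.map Prod.fst := (List.nodup_cons.mp hl).1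
    have ht : (t.map Prod.fst).Nodup := (List.nodup_cons.mp hl).2
    have hmem_keys : ∀ k, k ∈ m.keys ↔ m.contains k = true :=
      fun k => (PySem.Dict.contains_iff_mem_keys m k).symm
    have keyitems : ∀ q ∈ m.items, q.1 ∈ m.keys := fun q hq => PySem.Dict.mem_keys_of_mem_items m hq
    have hfilter_ins : ∀ (w : Option Int),
        t.filter (fun q => !((m.insert p.1 w).contains q.1))
          = t.filter (fun q => !(m.contains q.1)) := by
      intro w
      apply List.filter_congr
      intro q hq
      rw [PySem.Dict.contains_insert]
      have : (q.1 == p.1) = false := by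
        apply beq_eq_false_iff_ne.mpr
        intro hEq
        exact hpt (hEq ▸ List.mem_map.mpr ⟨q, hq, rfl⟩)
      rw [this]; simp
    simp only [List.foldl_cons]
    cases hv : p.2 with
    | some v =>
      have hstep : mergeStepA m p = m.insert p.1 (some v) := by
        unfold mergeStepA; rw [hv]
      rw [hstep]
      by_cases hc : m.contains p.1 = true
      · rw [ih _ (PySem.Dict.nodup_keys_insert m p.1 (some v) hm) ht]
        rw [PySem.Dict.items_insert_of_contains m (some v) hc]
        rw [hfilter_ins, List.map_map]
        have hfilter2 : (p :: t).filter (fun q => !(m.contains q.1))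
            = t.filter (fun q => !(m.contains q.1)) := by
          rw [List.filter_cons, hc]; simp
        rw [hfilter2]
        congr 1
        apply List.map_congr_left
        intro q hq
        by_cases hqp : q.1 = p.1
        · have hb : (q.1 == p.1) = true := beq_iff_eq.mpr hqp
          rw [updv_cons_self_some' p t q.1 q.2 v hqp.symm hv]
          simp only [Function.comp, hb, if_pos]
          rw [updv_not_mem t p.1 (some v) hpt, hqp]
        · have hb : (q.1 == p.1) = false := beq_eq_false_iff_ne.mpr hqp
          rw [updv_cons_ne p t q.1 q.2 (Ne.symm hqp)]
          simp only [Function.comp, hb]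
          simp
      · have hc' : m.contains p.1 = false := by simpa using hc
        rw [ih _ (PySem.Dict.nodup_keys_insert m p.1 (some v) hm) ht]
        rw [PySem.Dict.items_insert_of_not_contains m (some v) hc']
        rw [List.map_append, hfilter_ins]
        have hfilter2 : (p :: t).filter (fun q => !(m.contains q.1))
            = p :: t.filter (fun q => !(m.contains q.1)) := by
          rw [List.filter_cons, hc']; simp
        rw [hfilter2]
        have hmap : m.items.map (fun q => (q.1, updv (p :: t) q.1 q.2))
            = m.items.map (fun q => (q.1, updv t q.1 q.2)) := by
          apply List.map_congr_left
          intro q hq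
          have hqp : q.1 ≠ p.1 := by
            intro hEq
            exact hc ((hmem_keys p.1).mp (hEq ▸ keyitems q hq))
          rw [updv_cons_ne p t q.1 q.2 (Ne.symm hqp)]
        rw [hmap]
        have hp : p = (p.1, some v) := by cases p; simp_all
        have hsing : List.map (fun q => (q.1, updv t q.1 q.2)) [p] = [p] := by
          rw [hp]
          simp only [List.map_cons, List.map_nil]
          rw [updv_not_mem t p.1 (some v) hpt]
        rw [← hp, hsing, List.append_assoc, List.singleton_append]
    | none =>
      have hstep : mergeStepA m p
          = if m.contains p.1 = false then m.insert p.1 none else m := by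
        unfold mergeStepA; rw [hv]
      by_cases hc : m.contains p.1 = true
      · rw [hstep, if_neg (by simp [hc])]
        rw [ih _ hm ht]
        have hfilter2 : (p :: t).filter (fun q => !(m.contains q.1))
            = t.filter (fun q => !(m.contains q.1)) := by
          rw [List.filter_cons, hc]; simp
        rw [hfilter2]
        congr 1
        apply List.map_congr_left
        intro q hq
        by_cases hqp : q.1 = p.1
        · rw [updv_cons_self_none p t q.1 q.2 hqp.symm hv]
          rw [hqp, updv_not_mem t p.1 q.2 hpt]
        · rw [updv_cons_ne p t q.1 q.2 (Ne.symm hqp)]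
      · have hc' : m.contains p.1 = false := by simpa using hc
        rw [hstep, if_pos hc']
        rw [ih _ (PySem.Dict.nodup_keys_insert m p.1 none hm) ht]
        rw [PySem.Dict.items_insert_of_not_contains m none hc']
        rw [List.map_append, hfilter_ins]
        have hfilter2 : (p :: t).filter (fun q => !(m.contains q.1))
            = p :: t.filter (fun q => !(m.contains q.1)) := by
          rw [List.filter_cons, hc']; simp
        rw [hfilter2]
        have hmap : m.items.map (fun q => (q.1, updv (p :: t) q.1 q.2))
            = m.items.map (fun q => (q.1, updv t q.1 q.2)) := by
          apply List.map_congr_left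
          intro q hq
          have hqp : q.1 ≠ p.1 := by
            intro hEq
            exact hc ((hmem_keys p.1).mp (hEq ▸ keyitems q hq))
          rw [updv_cons_ne p t q.1 q.2 (Ne.symm hqp)]
        rw [hmap]
        have hp : p = (p.1, (none : Option Int)) := by cases p; simp_all
        have hsing : List.map (fun q => (q.1, updv t q.1 q.2)) [p] = [p] := by
          rw [hp]
          simp only [List.map_cons, List.map_nil]
          rw [updv_not_mem t p.1 none hpt]
        rw [← hp, hsing, List.append_assoc, List.singleton_append]

-- updv of a nodup-keyed dict's items agrees with the dict's getD
theorem updv_items (c : PySem.Dict String (Option Int)) (hnd : c.keys.Nodup) (k : String) (v : Option Int) :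
    updv c.items k v = match c.getD k none with | some w => some w | none => v := by
  unfold updv
  cases hfind : c.items.find? (fun q => q.1 == k) with
  | none =>
    have hnone : ∀ q ∈ c.items, ¬ ((q.1 == k) = true) := by
      intro q hq
      have := List.find?_eq_none.mp hfind q hq
      simpa using this
    have hk : c.get? k = none := by
      rw [PySem.Dict.get?_eq_none_iff_not_mem_keys]
      intro hmem
      have hmem' : k ∈ c.items.map Prod.fst := by
        simpa only [PySem.Dict.keys] using hmem
      obtain ⟨q, hq, hq1⟩ := List.mem_map.mp hmem'
      exact hnone q hq (beq_iff_eq.mpr hq1)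
    rw [PySem.Dict.getD_eq_get?_getD, hk]
    rfl
  | some q =>
    obtain ⟨k1, w⟩ := q
    have hmem : (k1, w) ∈ c.items := List.mem_of_find?_eq_some hfind
    have hq1 : k1 = k := by simpa using List.find?_some hfind
    subst hq1
    have hget : c.get? k1 = some w := PySem.Dict.get?_of_mem_items c hmem hnd
    rw [PySem.Dict.getD_eq_get?_getD, hget]
    cases w <;> rfl

-- ===== VERDICT (by name: the statement is the Claim_ definition above) =====
theorem merge_non_none_py_spec : Claim_equal_merge_non_none_py := by
  intro previous current _
  unfold Spec_merge_non_none_py merge_non_none_py merge_non_none_py_alt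
  set P := PySem.Dict.ofList previous with hP
  set C := PySem.Dict.ofList current with hC
  have hndP : P.keys.Nodup := PySem.Dict.nodup_keys_ofList previous
  have hndC : C.keys.Nodup := PySem.Dict.nodup_keys_ofList current
  have hndCl : (C.items.map Prod.fst).Nodup := by
    simpa only [PySem.Dict.keys] using hndC
  rw [foldl_mergeStepA_items C.items P hndP hndCl]
  rw [List.map_append]
  congr 1
  · rw [PySem.Dict.items_eq_map_keys P hndP none, List.map_map]
    apply List.map_congr_left
    intro k _
    show (k, updv C.items k (P.getD k none)) = _
    rw [updv_items C hndC]
  · rw [PySem.Dict.items_eq_map_keys C hndC none, List.filter_map]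
    have hpred : ((fun q => !(P.contains q.1)) ∘ fun k => (k, C.getD k none))
        = fun k => !(P.contains k) := rfl
    rw [hpred]
    apply List.map_congr_left
    intro k hk
    have hkc : P.contains k = false := by
      have := (List.mem_filter.mp hk).2
      simpa using this
    rw [PySem.Dict.getD_of_not_contains P none hkc]
    cases C.getD k none <;> rfl
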